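-- pv_equiv track=rewrite | github.com/Skylerliutian/COMP9318 | lab/Lab2_specs/submission.py | buc_single
-- ===== SOURCE A (Python) =====
-- def buc_single(prefix, data, column):
--     length = column - 1
--     result = []
--     iter_time = 2 ** length
--     for i in range(iter_time):
--         copy = [i for i in data]
--         for j in range(length):
--             if i % (2 ** (length - j)) > (2 ** (length - j - 1) - 1):
--                 copy[j] = 'ALL'
--         result.append(prefix + copy)
--     return result
-- ===== SOURCE B (Python) =====
-- def buc_single(prefix, data, column):
--     length = column - 1
--
--     def rows(j):
--         if j >= length:
--             return [data[length:]]
--         return [[v] + t for v in (data[j], 'ALL') for t in rows(j + 1)]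
--
--     return [prefix + r for r in rows(0)]
-- ===== Notes on version B (the rewrite author's own statement) =====
-- stated objective: alternative
-- what changed: Replaces the 2^length integer-index loop with bit-test masking by a recursive per-column combination generator (each column yields its value or 'ALL', combinations built depth-first), keeping the same output order.
import Mathlib
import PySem

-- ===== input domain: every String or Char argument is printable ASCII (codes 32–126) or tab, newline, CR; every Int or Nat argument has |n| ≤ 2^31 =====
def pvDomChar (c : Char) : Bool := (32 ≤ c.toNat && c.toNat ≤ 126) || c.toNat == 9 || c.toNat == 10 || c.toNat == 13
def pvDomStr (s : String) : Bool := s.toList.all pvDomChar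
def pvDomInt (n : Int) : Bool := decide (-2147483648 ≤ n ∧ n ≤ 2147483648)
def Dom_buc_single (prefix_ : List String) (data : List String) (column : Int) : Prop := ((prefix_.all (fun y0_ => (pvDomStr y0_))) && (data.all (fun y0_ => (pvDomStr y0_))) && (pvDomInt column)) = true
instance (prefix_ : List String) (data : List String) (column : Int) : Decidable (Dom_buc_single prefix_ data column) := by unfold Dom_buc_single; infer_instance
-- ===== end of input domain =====

-- B replaces A's 2^length index loop with bit-test masking by a recursive per-column
-- combination generator (objective: alternative, same output, same exponential cost).

-- ===== PORT A =====
def buc_single (prefix_ : List String) (data : List String) (column : Int) : List (List String) :=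
  let length := column - 1
  -- Python: for length < 0, 2 ** length is a float and range(...) raises TypeError (excluded by Pre_)
  if length < 0 then []
  else
    let L := length.toNat
    (List.range (2 ^ L)).foldl (fun result i =>
      let copy := (List.range L).foldl (fun c j =>
        -- Python: copy[j] = 'ALL' raises IndexError when j ≥ len(data) (excluded by Pre_)
        if i % 2 ^ (L - j) > 2 ^ (L - j - 1) - 1 then c.set j "ALL" else c) data
      result ++ [prefix_ ++ copy]) []

-- ===== PORT B =====
-- Source B's recursive helper `rows(j)`: combinations for columns j..length-1 followed by data[length:].
-- data[j] in Source B raises IndexError for j ≥ len(data) (excluded by Pre_); getD is exact inside Pre_.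
def bucRows (data : List String) (length : Nat) (j : Nat) : List (List String) :=
  if _h : length ≤ j then [List.drop length data]
  else [data.getD j "", "ALL"].flatMap (fun v => (bucRows data length (j + 1)).map (fun t => v :: t))
termination_by length - j

def buc_single_alt (prefix_ : List String) (data : List String) (column : Int) : List (List String) :=
  -- column ≥ 1 inside Pre_, so toNat is exact there
  let length := (column - 1).toNat
  (bucRows data length 0).map (fun r => prefix_ ++ r)

-- ===== PRECONDITION & SPEC =====
-- Pre_ excludes exactly the inputs on which Python A raises: column < 1 (2**negative is a
-- float, range raises TypeError) and column - 1 > len(data) (copy[j] = 'ALL' raises IndexError).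
def Pre_buc_single (prefix_ : List String) (data : List String) (column : Int) : Prop :=
  1 ≤ column ∧ column - 1 ≤ (data.length : Int)
instance (prefix_ : List String) (data : List String) (column : Int) : Decidable (Pre_buc_single prefix_ data column) := by unfold Pre_buc_single; infer_instance

def pvWitness_buc_single : List String × List String × Int := (["p"], ["a", "b"], 2)

def Spec_buc_single (prefix_ : List String) (data : List String) (column : Int) (out : List (List String)) : Prop := out = buc_single_alt prefix_ data column
instance (prefix_ : List String) (data : List String) (column : Int) (out : List (List String)) : Decidable (Spec_buc_single prefix_ data column out) := by unfold Spec_buc_single; infer_instance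

-- ===== CLAIM (what is proved, stated in full; the proofs are below) =====
def Claim_equal_buc_single : Prop := ∀ (prefix_ : List String) (data : List String) (column : Int), Dom_buc_single prefix_ data column → Pre_buc_single prefix_ data column → Spec_buc_single prefix_ data column (buc_single prefix_ data column)

-- ===== LEMMAS AND PROOFS =====

-- structural form of A's inner masking loop: mask the first L columns by the bits of i (MSB = column 0)
def maskF : Nat → Nat → List String → List String
  | 0, _, data => data
  | _ + 1, _, [] => []
  | L + 1, i, d :: rest => (if i % 2 ^ (L + 1) > 2 ^ L - 1 then "ALL" else d) :: maskF L i rest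

-- A's outer loop is an append-accumulating map
lemma foldl_push {α β : Type} (g : α → β) :
    ∀ (l : List α) (acc : List β), l.foldl (fun r x => r ++ [g x]) acc = acc ++ l.map g := by
  intro l
  induction l with
  | nil => simp
  | cons a t ih => intro acc; simp [List.foldl_cons, ih]

lemma foldl_set_nil (p : Nat → Prop) [DecidablePred p] (s : String) (l : List Nat) :
    l.foldl (fun c j => if p j then c.set j s else c) ([] : List String) = [] := by
  induction l with
  | nil => rfl
  | cons a t ih => simp only [List.foldl_cons]; split <;> simpa using ih

lemma foldl_set_shift (p : Nat → Prop) [DecidablePred p] (s : String) :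
    ∀ (L : Nat) (d : String) (c : List String),
      (List.range L).foldl (fun c j => if p j then c.set (j + 1) s else c) (d :: c)
        = d :: (List.range L).foldl (fun c j => if p j then c.set j s else c) c := by
  intro L
  induction L with
  | zero => intro d c; rfl
  | succ n ih =>
    intro d c
    simp only [List.range_succ, List.foldl_append, List.foldl_cons, List.foldl_nil, ih]
    split <;> simp [List.set_cons_succ]

-- A's inner loop computes maskF
lemma foldlMask_eq_maskF :
    ∀ (L : Nat) (i : Nat) (data : List String),
      (List.range L).foldl (fun c j =>
        if i % 2 ^ (L - j) > 2 ^ (L - j - 1) - 1 then c.set j "ALL" else c) data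
      = maskF L i data := by
  intro L
  induction L with
  | zero => intro i data; rfl
  | succ n ih =>
    intro i data
    cases data with
    | nil => simpa [maskF] using foldl_set_nil (fun j => i % 2 ^ (n + 1 - j) > 2 ^ (n + 1 - j - 1) - 1) "ALL" (List.range (n + 1))
    | cons d rest =>
      rw [List.range_succ_eq_map, List.foldl_cons, List.foldl_map]
      simp only [Nat.sub_zero, Nat.succ_sub_succ]
      split
      · rw [show (d :: rest).set 0 "ALL" = "ALL" :: rest from rfl,
          foldl_set_shift (fun j => i % 2 ^ (n - j) > 2 ^ (n - j - 1) - 1) "ALL" n "ALL" rest,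
          ih i rest, maskF]
        simp_all
      · rw [foldl_set_shift (fun j => i % 2 ^ (n - j) > 2 ^ (n - j - 1) - 1) "ALL" n d rest,
          ih i rest, maskF]
        simp_all

-- maskF only looks at i modulo 2^L
lemma maskF_mod_add : ∀ (L k i : Nat) (data : List String),
    maskF L (k * 2 ^ L + i) data = maskF L i data := by
  intro L
  induction L with
  | zero => intro k i data; rfl
  | succ n ih =>
    intro k i data
    cases data with
    | nil => rfl
    | cons d rest =>
      have h1 : (k * 2 ^ (n + 1) + i) % 2 ^ (n + 1) = i % 2 ^ (n + 1) := by
        rw [Nat.mul_comm]; exact Nat.mul_add_mod _ _ _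
      have h2 : k * 2 ^ (n + 1) + i = (2 * k) * 2 ^ n + i := by ring
      simp only [maskF]
      rw [h1, show k * 2 ^ (n + 1) + i = 2 * k * 2 ^ n + i from by ring, ih]

-- the range-map of maskF satisfies the same cons-recursion as B's combination generator
lemma rowsA_succ (L : Nat) (d : String) (rest : List String) :
    (List.range (2 ^ (L + 1))).map (fun i => maskF (L + 1) i (d :: rest))
      = ((List.range (2 ^ L)).map (fun i => maskF L i rest)).map (fun t => d :: t)
        ++ ((List.range (2 ^ L)).map (fun i => maskF L i rest)).map (fun t => "ALL" :: t) := by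
  have hsplit : List.range (2 ^ (L + 1)) = List.range (2 ^ L) ++ (List.range (2 ^ L)).map (fun x => 2 ^ L + x) := by
    rw [show 2 ^ (L + 1) = 2 ^ L + 2 ^ L from by ring]; exact List.range_add
  rw [hsplit, List.map_append, List.map_map, List.map_map, List.map_map]
  congr 1
  · apply List.map_congr_left
    intro i hi
    have hi' : i < 2 ^ L := List.mem_range.mp hi
    have hlt : i < 2 ^ (L + 1) := lt_of_lt_of_le hi' (Nat.pow_le_pow_right (by norm_num) (Nat.le_succ L))
    have hmod : i % 2 ^ (L + 1) = i := Nat.mod_eq_of_lt hlt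
    have hcond : ¬ (i % 2 ^ (L + 1) > 2 ^ L - 1) := by
      rw [hmod]; omega
    simp [maskF, hcond]
  · apply List.map_congr_left
    intro i hi
    have hi' : i < 2 ^ L := List.mem_range.mp hi
    have hlt : 2 ^ L + i < 2 ^ (L + 1) := by
      have : 2 ^ (L + 1) = 2 ^ L + 2 ^ L := by ring
      omega
    have hmod : (2 ^ L + i) % 2 ^ (L + 1) = 2 ^ L + i := Nat.mod_eq_of_lt hlt
    have hcond : (2 ^ L + i) % 2 ^ (L + 1) > 2 ^ L - 1 := by
      rw [hmod]
      have : 0 < 2 ^ L := by positivity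
      omega
    have htail : maskF L (2 ^ L + i) rest = maskF L i rest := by
      simpa using maskF_mod_add L 1 i rest
    simp [maskF, hcond, htail]

-- B's recursion computes the same masked rows as A, column by column
lemma bucRows_eq : ∀ (n : Nat) (data : List String) (length j : Nat),
    length = j + n → length ≤ data.length →
    bucRows data length j = (List.range (2 ^ n)).map (fun i => maskF n i (List.drop j data)) := by
  intro n
  induction n with
  | zero =>
    intro data length j hlen _hle
    rw [bucRows]
    simp [hlen, maskF]
  | succ m ih =>
    intro data length j hlen hle
    rw [bucRows]
    have hjlt : ¬ length ≤ j := by omega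
    simp only [hjlt, dite_false]
    have hdrop : ∃ d rest, List.drop j data = d :: rest := by
      have : j < data.length := by omega
      cases hdj : List.drop j data with
      | nil => exfalso; have := List.drop_eq_nil_iff.mp hdj; omega
      | cons d rest => exact ⟨d, rest, rfl⟩
    obtain ⟨d, rest, hdj⟩ := hdrop
    have hget : data.getD j "" = d := by
      have : data[j]? = some d := by
        rw [← List.head?_drop, hdj]; rfl
      simp [List.getD_eq_getElem?_getD, this]
    have htail : List.drop (j + 1) data = rest := by
      rw [← List.tail_drop, hdj]; rfl
    rw [hdj, rowsA_succ m d rest, ih data length (j + 1) (by omega) hle, htail, hget]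
    simp [List.flatMap_cons, List.flatMap_nil]

-- ===== VERDICT (by name: the statement is the Claim_ definition above) =====
theorem buc_single_spec : Claim_equal_buc_single := by
  intro prefix_ data column _hdom hpre
  obtain ⟨h1, h2⟩ := hpre
  unfold Spec_buc_single buc_single buc_single_alt
  have hnn : ¬ (column - 1 < 0) := by omega
  simp only [hnn, if_false]
  have hL : (column - 1).toNat ≤ data.length := by omega
  set L := (column - 1).toNat with hLdef
  simp only [foldlMask_eq_maskF]
  rw [foldl_push (fun i => prefix_ ++ maskF L i data) (List.range (2 ^ L)) []]
  rw [bucRows_eq L data L 0 (by omega) hL]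
  simp [List.map_map, Function.comp]
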